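-- pv_equiv track=rewrite | github.com/nurangudekli/aiopsframework | backend/services/data_sources.py | _auto_detect_mapping
-- ===== SOURCE A (Python) =====
-- from typing import Any, Dict, List, Optional
--
-- def _auto_detect_mapping(sample: Dict[str, Any]) -> Dict[str, str]:
--     """Best-effort mapping from source fields → golden dataset fields."""
--     mapping: Dict[str, str] = {}
--     keys_lower = {k.lower(): k for k in sample}
--
--     # Question patterns
--     for pattern in ("question", "query", "user_query", "input", "prompt", "user_message", "request"):
--         if pattern in keys_lower:
--             mapping["question"] = keys_lower[pattern]
--             break
--
--     # Expected answer patterns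
--     for pattern in ("expected_answer", "answer", "response", "bot_response", "output",
--                     "assistant_message", "completion", "expected_output", "ground_truth"):
--         if pattern in keys_lower:
--             mapping["expected_answer"] = keys_lower[pattern]
--             break
--
--     # Context
--     for pattern in ("context", "session_context", "system_prompt", "system_message", "background"):
--         if pattern in keys_lower:
--             mapping["context"] = keys_lower[pattern]
--             break
--
--     # Category
--     for pattern in ("category", "type", "topic", "domain", "intent"):
--         if pattern in keys_lower:
--             mapping["category"] = keys_lower[pattern]
--             break
--
--     # Difficulty
--     for pattern in ("difficulty", "level", "complexity"):
--         if pattern in keys_lower: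
--             mapping["difficulty"] = keys_lower[pattern]
--             break
--
--     return mapping
-- ===== SOURCE B (Python) =====
-- # Single-pass detection via an inverted pattern index instead of five repeated scans.
-- _TABLE = (
--     ("question", ("question", "query", "user_query", "input", "prompt", "user_message", "request")),
--     ("expected_answer", ("expected_answer", "answer", "response", "bot_response", "output",
--                          "assistant_message", "completion", "expected_output", "ground_truth")),
--     ("context", ("context", "session_context", "system_prompt", "system_message", "background")),
--     ("category", ("category", "type", "topic", "domain", "intent")),
--     ("difficulty", ("difficulty", "level", "complexity")),
-- )
-- _REV = {p: (target, rank) for target, pats in _TABLE for rank, p in enumerate(pats)}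
--
-- def _auto_detect_mapping(sample):
--     """Best-effort mapping from source fields -> golden dataset fields."""
--     best = {}
--     for key in sample:
--         hit = _REV.get(key.lower())
--         if hit is not None:
--             target, rank = hit
--             prev = best.get(target)
--             if prev is None or rank <= prev[1]:
--                 best[target] = (key, rank)
--     return {target: best[target][0] for target, _ in _TABLE if target in best}
-- ===== Notes on version B (the rewrite author's own statement) =====
-- stated objective: idiomatic
-- what changed: Replaces the five sequential first-match pattern scans over a lowercased-key dict with one inverted index (pattern -> (target, rank)) built once and a single pass over the sample keys keeping the best-ranked hit per target.
import Mathlib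
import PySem

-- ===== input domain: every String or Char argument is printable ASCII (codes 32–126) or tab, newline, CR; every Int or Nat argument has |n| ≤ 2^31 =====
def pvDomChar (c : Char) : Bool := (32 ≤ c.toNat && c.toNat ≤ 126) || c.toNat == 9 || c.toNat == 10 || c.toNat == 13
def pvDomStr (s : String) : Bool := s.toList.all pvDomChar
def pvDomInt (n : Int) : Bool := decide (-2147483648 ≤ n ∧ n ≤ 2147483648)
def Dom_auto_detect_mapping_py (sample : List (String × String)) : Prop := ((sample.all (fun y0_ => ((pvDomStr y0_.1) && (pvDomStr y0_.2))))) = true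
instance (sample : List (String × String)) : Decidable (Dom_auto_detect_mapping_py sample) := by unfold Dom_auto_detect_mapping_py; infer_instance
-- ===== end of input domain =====

-- B replaces A's five first-match pattern scans with one inverted pattern->(target,rank) index and a
-- single best-rank pass over the sample keys (objective: more idiomatic single-pass structure; same cost).

-- shared pattern-list constants (the literal tuples from the Python sources)
def qPats : List String := ["question", "query", "user_query", "input", "prompt", "user_message", "request"]
def ansPats : List String := ["expected_answer", "answer", "response", "bot_response", "output",
  "assistant_message", "completion", "expected_output", "ground_truth"]
def ctxPats : List String := ["context", "session_context", "system_prompt", "system_message", "background"]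
def catPats : List String := ["category", "type", "topic", "domain", "intent"]
def diffPats : List String := ["difficulty", "level", "complexity"]

-- ===== PORT A =====
-- keys_lower = {k.lower(): k for k in sample}
def klOf (sample : List (String × String)) : PySem.Dict String String :=
  sample.foldl (fun d kv => d.insert (PySem.Str.lower kv.1) kv.1) PySem.Dict.empty

-- 'for pattern in pats: if pattern in keys_lower: mapping[target] = keys_lower[pattern]; break'
def scanLoop (kl : PySem.Dict String String) (m : PySem.Dict String String) (target : String) :
    List String → PySem.Dict String String
  | [] => m
  | p :: rest =>
    if kl.contains p then m.insert target (kl.getD p "") else scanLoop kl m target rest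

def auto_detect_mapping_py (sample : List (String × String)) : List (String × String) :=
  let kl := klOf sample
  let m0 : PySem.Dict String String := PySem.Dict.empty
  let m1 := scanLoop kl m0 "question" qPats
  let m2 := scanLoop kl m1 "expected_answer" ansPats
  let m3 := scanLoop kl m2 "context" ctxPats
  let m4 := scanLoop kl m3 "category" catPats
  let m5 := scanLoop kl m4 "difficulty" diffPats
  m5.items

-- ===== PORT B =====
def tableB : List (String × List String) :=
  [("question", qPats), ("expected_answer", ansPats), ("context", ctxPats),
   ("category", catPats), ("difficulty", diffPats)]

-- _REV = {p: (target, rank) for target, pats in _TABLE for rank, p in enumerate(pats)}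
def revB : PySem.Dict String (String × Int) :=
  tableB.foldl
    (fun d tp => (PySem.List.enumerate tp.2 0).foldl (fun d rp => d.insert rp.2 (tp.1, rp.1)) d)
    PySem.Dict.empty

-- loop body: look the lowered key up in the inverted index, keep the best (lowest, latest-on-tie) rank
def stepB (b : PySem.Dict String (String × Int)) (kv : String × String) :
    PySem.Dict String (String × Int) :=
  match revB.get? (PySem.Str.lower kv.1) with
  | none => b
  | some tr =>
    match b.get? tr.1 with
    | none => b.insert tr.1 (kv.1, tr.2)
    | some pr => if tr.2 ≤ pr.2 then b.insert tr.1 (kv.1, tr.2) else b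

def auto_detect_mapping_py_alt (sample : List (String × String)) : List (String × String) :=
  let best := sample.foldl stepB PySem.Dict.empty
  tableB.filterMap (fun tp => (best.get? tp.1).map (fun pr => (tp.1, pr.1)))

-- ===== PRECONDITION & SPEC =====
def Spec_auto_detect_mapping_py (sample : List (String × String)) (out : List (String × String)) : Prop := out = auto_detect_mapping_py_alt sample
instance (sample : List (String × String)) (out : List (String × String)) : Decidable (Spec_auto_detect_mapping_py sample out) := by unfold Spec_auto_detect_mapping_py; infer_instance

-- ===== CLAIM (what is proved, stated in full; the proofs are below) =====
def Claim_equal_auto_detect_mapping_py : Prop := ∀ (sample : List (String × String)), Dom_auto_detect_mapping_py sample → Spec_auto_detect_mapping_py sample (auto_detect_mapping_py sample)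

-- ===== LEMMAS AND PROOFS =====

-- the value A's break-loop selects: the first pattern present in kl, mapped through kl
def pick (kl : PySem.Dict String String) : List String → Option String
  | [] => none
  | p :: rest => match kl.get? p with | some k => some k | none => pick kl rest

-- invariant tying B's per-target best entry to kl, for one table row
def InvT (kl : PySem.Dict String String) (b : PySem.Dict String (String × Int))
    (t : String) (pats : List String) : Prop :=
  match b.get? t with
  | none => ∀ p ∈ pats, kl.get? p = none
  | some kr => ∃ i : Nat, (i : Int) = kr.2 ∧ ∃ p, pats[i]? = some p ∧ kl.get? p = some kr.1 ∧
      ∀ j, j < i → ∀ q, pats[j]? = some q → kl.get? q = none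

lemma F1 : ∀ tp ∈ tableB, ∀ pr ∈ PySem.List.enumerate tp.2 0, revB.get? pr.2 = some (tp.1, pr.1) := by decide

lemma F2 : ∀ e ∈ revB.items, ∃ tp ∈ tableB, ∃ pr ∈ PySem.List.enumerate tp.2 0,
    e = (pr.2, (tp.1, pr.1)) := by decide

lemma F3 : ∀ tp ∈ tableB, ∀ tp' ∈ tableB, tp.1 = tp'.1 → tp = tp' := by decide

lemma F4 : ∀ tp ∈ tableB, tp.2.Nodup := by decide

lemma scanLoop_eq (kl m : PySem.Dict String String) (t : String) :
    ∀ pats, scanLoop kl m t pats =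
      match pick kl pats with | none => m | some k => m.insert t k := by
  intro pats
  induction pats with
  | nil => rfl
  | cons p rest ih =>
    simp only [scanLoop, pick, PySem.Dict.contains_eq_isSome_get?]
    cases h : kl.get? p with
    | none => simpa [h] using ih
    | some k => simp [PySem.Dict.getD_of_get?_eq_some _ _ h]

lemma pick_none (kl : PySem.Dict String String) :
    ∀ pats, (∀ p ∈ pats, kl.get? p = none) → pick kl pats = none := by
  intro pats
  induction pats with
  | nil => intro _; rfl
  | cons p rest ih =>
    intro h
    have h0 : kl.get? p = none := h p (List.mem_cons_self)
    simp only [pick, h0]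
    exact ih (fun q hq => h q (List.mem_cons_of_mem _ hq))

lemma pick_some (kl : PySem.Dict String String) :
    ∀ pats (i : Nat) p k, pats[i]? = some p → kl.get? p = some k →
      (∀ j, j < i → ∀ q, pats[j]? = some q → kl.get? q = none) → pick kl pats = some k := by
  intro pats
  induction pats with
  | nil => intro i p k h; simp at h
  | cons p0 rest ih =>
    intro i p k hip hk hbef
    cases i with
    | zero =>
      simp only [List.getElem?_cons_zero, Option.some_inj] at hip
      subst hip
      simp [pick, hk]
    | succ i =>
      have h0 : kl.get? p0 = none := hbef 0 (Nat.succ_pos _) p0 (by simp)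
      simp only [pick, h0]
      exact ih i p k (by simpa using hip) hk
        (fun j hj q hq => hbef (j + 1) (by omega) q (by simpa using hq))

lemma inv_pick (kl : PySem.Dict String String) (b : PySem.Dict String (String × Int))
    (t : String) (pats : List String) (h : InvT kl b t pats) :
    pick kl pats = (b.get? t).map (·.1) := by
  cases hb : b.get? t with
  | none =>
    simp only [InvT, hb] at h
    simp [pick_none kl pats h]
  | some kr =>
    simp only [InvT, hb] at h
    obtain ⟨i, _, p, hp, hk, hbef⟩ := h
    simp [pick_some kl pats i p kr.1 hp hk hbef]

lemma inv_step (kl : PySem.Dict String String) (b : PySem.Dict String (String × Int))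
    (kv : String × String) (tp : String × List String) (htp : tp ∈ tableB)
    (h : InvT kl b tp.1 tp.2) :
    InvT (kl.insert (PySem.Str.lower kv.1) kv.1) (stepB b kv) tp.1 tp.2 := by
  set lk := PySem.Str.lower kv.1 with hlkdef
  have hNd : tp.2.Nodup := F4 tp htp
  have hrevAt : ∀ (i : Nat) (p : String), tp.2[i]? = some p →
      revB.get? p = some (tp.1, (i : Int)) := by
    intro i p hip
    obtain ⟨hi, hEq⟩ := List.getElem?_eq_some_iff.mp hip
    exact F1 tp htp ((i : Int), p)
      ((PySem.List.mem_enumerate_iff _ _ _).mpr ⟨i, hi, by simp [hEq]⟩)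
  have preserve : ∀ (b' : PySem.Dict String (String × Int)),
      b'.get? tp.1 = b.get? tp.1 → (∀ (j : Nat) (q : String), tp.2[j]? = some q → q ≠ lk) →
      InvT (kl.insert lk kv.1) b' tp.1 tp.2 := by
    intro b' hb' hne
    cases hb : b.get? tp.1 with
    | none =>
      simp only [InvT, hb] at h
      simp only [InvT, hb', hb]
      intro p hp
      obtain ⟨j, hj⟩ := List.getElem?_of_mem hp
      rw [PySem.Dict.get?_insert_of_ne _ _ (hne j p hj)]
      exact h p hp
    | some kr =>
      simp only [InvT, hb] at h
      simp only [InvT, hb', hb]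
      obtain ⟨i, hi, p, hp, hk, hbef⟩ := h
      refine ⟨i, hi, p, hp, ?_, ?_⟩
      · rw [PySem.Dict.get?_insert_of_ne _ _ (hne i p hp)]; exact hk
      · intro j hj q hq
        rw [PySem.Dict.get?_insert_of_ne _ _ (hne j q hq)]
        exact hbef j hj q hq
  cases hrev : revB.get? lk with
  | none =>
    have hb' : stepB b kv = b := by simp only [stepB, ← hlkdef, hrev]
    rw [hb']
    refine preserve b rfl ?_
    intro j q hq heq
    have := hrevAt j q hq
    rw [heq, hrev] at this
    simp at this
  | some tr =>
    obtain ⟨tq, htq, pr, hpr, he⟩ := F2 _ (PySem.Dict.mem_items_of_get?_eq_some _ hrev)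
    obtain ⟨k0, hk0lt, hpe⟩ := (PySem.List.mem_enumerate_iff _ _ _).mp hpr
    rw [hpe] at he
    -- he : (lk, tr) = ((0 + k0, tq.2[k0]).2, (tq.1, (0 + k0, tq.2[k0]).1))
    have hlkq : lk = tq.2[k0] := congrArg Prod.fst he
    have htr0 : tr = (tq.1, (k0 : Int)) := by
      have := congrArg Prod.snd he
      simpa using this
    have hlkAt0 : tq.2[k0]? = some lk :=
      List.getElem?_eq_some_iff.mpr ⟨hk0lt, hlkq.symm⟩
    by_cases hteq : tq.1 = tp.1
    · -- the hit targets THIS row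
      have htqp : tq = tp := F3 tq htq tp htp hteq
      have htr : tr = (tp.1, (k0 : Int)) := by rw [htqp] at htr0; exact htr0
      have hlkAt : tp.2[k0]? = some lk := by rw [htqp] at hlkAt0; exact hlkAt0
      have hneIdx : ∀ (j : Nat) (q : String), tp.2[j]? = some q → j ≠ k0 → q ≠ lk := by
        intro j q hq hjne heq
        subst heq
        exact hjne (List.getElem?_inj (List.getElem?_eq_some_iff.mp hq).1 hNd (hq.trans hlkAt.symm))
      cases hb : b.get? tp.1 with
      | none =>
        simp only [InvT, hb] at h
        have hb' : stepB b kv = b.insert tp.1 (kv.1, (k0 : Int)) := by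
          simp only [stepB, ← hlkdef, hrev, htr, hb]
        rw [hb']
        simp only [InvT, PySem.Dict.get?_insert_self]
        refine ⟨k0, rfl, lk, hlkAt, PySem.Dict.get?_insert_self _ _ _, ?_⟩
        intro j hj q hq
        rw [PySem.Dict.get?_insert_of_ne _ _ (hneIdx j q hq (by omega))]
        exact h q (List.mem_of_getElem? hq)
      | some kr =>
        simp only [InvT, hb] at h
        obtain ⟨i0, hi0, p0, hp0, hk0, hbef0⟩ := h
        by_cases hle : (k0 : Int) ≤ kr.2
        · have hb' : stepB b kv = b.insert tp.1 (kv.1, (k0 : Int)) := by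
            simp only [stepB, ← hlkdef, hrev, htr, hb, if_pos hle]
          rw [hb']
          simp only [InvT, PySem.Dict.get?_insert_self]
          have hk0le : k0 ≤ i0 := by omega
          refine ⟨k0, rfl, lk, hlkAt, PySem.Dict.get?_insert_self _ _ _, ?_⟩
          intro j hj q hq
          rw [PySem.Dict.get?_insert_of_ne _ _ (hneIdx j q hq (by omega))]
          exact hbef0 j (by omega) q hq
        · have hb' : stepB b kv = b := by
            simp only [stepB, ← hlkdef, hrev, htr, hb, if_neg hle]
          rw [hb']
          have hi0k0 : i0 < k0 := by
            have : ¬ ((k0 : Int) ≤ (i0 : Int)) := by rw [hi0]; exact hle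
            omega
          simp only [InvT, hb]
          refine ⟨i0, hi0, p0, hp0, ?_, ?_⟩
          · rw [PySem.Dict.get?_insert_of_ne _ _ (hneIdx i0 p0 hp0 (by omega))]; exact hk0
          · intro j hj q hq
            rw [PySem.Dict.get?_insert_of_ne _ _ (hneIdx j q hq (by omega))]
            exact hbef0 j hj q hq
    · -- the hit targets ANOTHER row: this row's best entry and patterns are untouched
      have htr := htr0
      have hb' : (stepB b kv).get? tp.1 = b.get? tp.1 := by
        have hne1 : tp.1 ≠ tr.1 := by rw [htr]; simpa using fun hx => hteq hx.symm
        cases hrb : b.get? tr.1 with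
        | none =>
          simp only [stepB, ← hlkdef, hrev, hrb]
          exact PySem.Dict.get?_insert_of_ne _ _ hne1
        | some pr0 =>
          by_cases hle : tr.2 ≤ pr0.2
          · simp only [stepB, ← hlkdef, hrev, hrb, if_pos hle]
            exact PySem.Dict.get?_insert_of_ne _ _ hne1
          · simp only [stepB, ← hlkdef, hrev, hrb, if_neg hle]
      refine preserve _ hb' ?_
      intro j q hq heq
      have := hrevAt j q hq
      rw [heq, hrev, htr] at this
      have h2 : (tq.1, (k0 : Int)) = (tp.1, (j : Int)) := Option.some.inj this
      rw [Prod.mk.injEq] at h2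
      exact hteq h2.1

lemma inv_fold :
    ∀ (sample : List (String × String)) kl b,
      (∀ tp ∈ tableB, InvT kl b tp.1 tp.2) →
      ∀ tp ∈ tableB,
        InvT (sample.foldl (fun d kv => d.insert (PySem.Str.lower kv.1) kv.1) kl)
          (sample.foldl stepB b) tp.1 tp.2 := by
  intro sample
  induction sample with
  | nil => intro kl b h; simpa using h
  | cons kv rest ih =>
    intro kl b h
    simp only [List.foldl_cons]
    exact ih _ _ (fun tp htp => inv_step kl b kv tp htp (h tp htp))

lemma items_chain (kl : PySem.Dict String String) :
    ∀ (L : List (String × List String)) (m : PySem.Dict String String),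
      m.keys.Nodup → (∀ tp ∈ L, m.contains tp.1 = false) → (L.map (·.1)).Nodup →
      (L.foldl (fun m tp => scanLoop kl m tp.1 tp.2) m).items =
        m.items ++ L.filterMap (fun tp => (pick kl tp.2).map (fun k => (tp.1, k))) := by
  intro L
  induction L with
  | nil => intro m _ _ _; simp
  | cons tp rest ih =>
    intro m hnd hfresh hLnd
    simp only [List.map_cons, List.nodup_cons] at hLnd
    simp only [List.foldl_cons, List.filterMap_cons]
    rw [scanLoop_eq]
    cases hp : pick kl tp.2 with
    | none =>
      rw [ih m hnd (fun t' ht' => hfresh t' (List.mem_cons_of_mem _ ht')) hLnd.2]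
      simp
    | some k =>
      have hc : m.contains tp.1 = false := hfresh tp (List.mem_cons_self)
      rw [ih (m.insert tp.1 k) (PySem.Dict.nodup_keys_insert _ _ _ hnd) ?_ hLnd.2]
      · rw [PySem.Dict.items_insert_of_not_contains _ _ hc]
        simp
      · intro t' ht'
        rw [PySem.Dict.contains_insert]
        have hne : t'.1 ≠ tp.1 := by
          intro hx
          exact hLnd.1 (hx ▸ List.mem_map_of_mem ht')
        simp [hne, hfresh t' (List.mem_cons_of_mem _ ht')]

-- ===== VERDICT (by name: the statement is the Claim_ definition above) =====
theorem auto_detect_mapping_py_spec : Claim_equal_auto_detect_mapping_py := by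
  intro sample _
  unfold Spec_auto_detect_mapping_py
  have hA : auto_detect_mapping_py sample =
      (tableB.foldl (fun m tp => scanLoop (klOf sample) m tp.1 tp.2) PySem.Dict.empty).items := rfl
  rw [hA,
    items_chain (klOf sample) tableB PySem.Dict.empty
      (by simp [PySem.Dict.keys_empty])
      (by intro tp _; simp [PySem.Dict.contains_empty])
      (by decide)]
  have hinv := inv_fold sample PySem.Dict.empty PySem.Dict.empty
    (fun tp _ => by simp [InvT, PySem.Dict.get?_empty]) 
  unfold auto_detect_mapping_py_alt
  have : PySem.Dict.empty.items = ([] : List (String × String)) := rfl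
  rw [this, List.nil_append]
  apply List.filterMap_congr
  intro tp htp
  have hpick := inv_pick (klOf sample) (sample.foldl stepB PySem.Dict.empty) tp.1 tp.2
    (by exact hinv tp htp)
  rw [hpick]
  cases (sample.foldl stepB PySem.Dict.empty).get? tp.1 <;> rfl
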